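-- pv_equiv track=rewrite | github.com/ooms/adventofcode2022 | 202225/aoc_template.py | addAll
-- ===== SOURCE A (Python) =====
-- def addAll(lst):
--     new_lst = lst[0]
--     for i in range(len(lst)):
--         if i > 0:
--             if len(lst[i]) <= len(new_lst):
--                 for j in range(len(lst[i])):
--                         new_lst[j] = new_lst[j] + lst[i][j]
-- #            new_lst = [x + y for x,y in  zip(cycle(lst[i]),new_lst)]
--     return new_lst
-- ===== SOURCE B (Python) =====
-- def addAll(lst):
--     head = lst[0]
--     n = len(head)
--     valid = [r for r in lst[1:] if len(r) <= n]
--     return [head[j] + sum(r[j] for r in valid if j < len(r)) for j in range(n)]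
-- ===== Notes on version B (the rewrite author's own statement) =====
-- stated objective: alternative
-- what changed: B replaces A's row-major in-place accumulation (nested index loops mutating lst[0]) with a single filter of the valid rows followed by a column-major comprehension that sums each column directly.
import Mathlib
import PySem

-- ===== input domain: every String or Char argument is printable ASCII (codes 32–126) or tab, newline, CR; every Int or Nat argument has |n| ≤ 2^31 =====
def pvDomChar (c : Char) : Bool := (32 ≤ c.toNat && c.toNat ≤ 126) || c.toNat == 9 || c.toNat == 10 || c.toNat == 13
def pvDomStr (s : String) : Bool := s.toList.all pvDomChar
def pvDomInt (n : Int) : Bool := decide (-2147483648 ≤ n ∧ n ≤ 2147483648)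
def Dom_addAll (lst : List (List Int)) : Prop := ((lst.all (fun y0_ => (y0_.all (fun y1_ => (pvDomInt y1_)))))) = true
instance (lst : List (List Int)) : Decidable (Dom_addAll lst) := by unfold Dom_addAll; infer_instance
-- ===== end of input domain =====

-- B replaces A's row-major in-place accumulation with a filter of valid rows plus a
-- column-major summation; equivalence is about the RETURN value only (A mutates lst[0] in place).

-- ===== PORT A =====
-- inner loop: for j in range(len(row)): new_lst[j] = new_lst[j] + row[j]
def pvAddRow (row acc : List Int) : List Int :=
  (PySem.List.pyRange 0 (row.length : Int) 1).foldl
    (fun a j => PySem.List.pySetD a j (PySem.List.pyGetD a j 0 + PySem.List.pyGetD row j 0)) acc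

def addAll (lst : List (List Int)) : List Int :=
  (PySem.List.enumerate lst).foldl
    (fun new_lst p =>
      if p.1 > 0 then
        if p.2.length ≤ new_lst.length then pvAddRow p.2 new_lst else new_lst
      else new_lst)
    (lst.headD [])

-- ===== PORT B =====
def addAll_alt (lst : List (List Int)) : List Int :=
  let head := lst.headD []
  let n := head.length
  let valid := lst.tail.filter (fun r => r.length ≤ n)
  (List.range n).map (fun j =>
    head.getD j 0 + (valid.filterMap (fun r => if j < r.length then some (r.getD j 0) else none)).sum)

-- ===== PRECONDITION & SPEC =====
-- Pre_ excludes only the empty list, on which Python A raises IndexError (lst[0]).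
def Pre_addAll (lst : List (List Int)) : Prop := lst ≠ []
instance (lst : List (List Int)) : Decidable (Pre_addAll lst) := by unfold Pre_addAll; infer_instance
def pvWitness_addAll : List (List Int) := [[1, 2], [3]]

def Spec_addAll (lst : List (List Int)) (out : List Int) : Prop := out = addAll_alt lst
instance (lst : List (List Int)) (out : List Int) : Decidable (Spec_addAll lst out) := by unfold Spec_addAll; infer_instance

-- ===== CLAIM (what is proved, stated in full; the proofs are below) =====
def Claim_equal_addAll : Prop := ∀ (lst : List (List Int)), Dom_addAll lst → Pre_addAll lst → Spec_addAll lst (addAll lst)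

-- ===== LEMMAS AND PROOFS =====

def pvStep (new_lst row : List Int) : List Int :=
  if row.length ≤ new_lst.length then pvAddRow row new_lst else new_lst

theorem pvAddRow_partial (row acc : List Int) (m : Nat) :
    (PySem.List.pyRange 0 (m : Int) 1).foldl
      (fun a j => PySem.List.pySetD a j (PySem.List.pyGetD a j 0 + PySem.List.pyGetD row j 0)) acc
    = acc.mapIdx (fun j x => if j < m then x + row.getD j 0 else x) := by
  induction m with
  | zero =>
    simp [PySem.List.pyRange_zero_nat]
    apply List.ext_getElem <;> simp
  | succ m ih =>
    rw [show ((m + 1 : Nat) : Int) = (m : Int) + 1 by push_cast; ring,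
        PySem.List.pyRange_one_succ_right (by positivity), List.foldl_append]
    rw [ih]
    simp only [List.foldl_cons, List.foldl_nil, PySem.List.pySetD_natCast,
      PySem.List.pyGetD_natCast]
    apply List.ext_getElem
    · simp
    · intro j hj hj'
      by_cases hjm : j = m
      · subst hjm
        simp only [List.length_mapIdx] at hj
        rw [List.getElem_set_self]
        rw [List.getD_eq_getElem _ _ (by simpa using hj')]
        simp
      · rw [List.getElem_set_ne (by omega)]
        simp only [List.getElem_mapIdx]
        have : j < m + 1 ↔ j < m := by omega
        simp [this]

theorem pvAddRow_spec (row acc : List Int) :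
    pvAddRow row acc = acc.mapIdx (fun j x => if j < row.length then x + row.getD j 0 else x) :=
  pvAddRow_partial row acc row.length

theorem pvStep_length (acc row : List Int) : (pvStep acc row).length = acc.length := by
  unfold pvStep
  split <;> simp [pvAddRow_spec]

theorem enum_fold_eq (rs : List (List Int)) :
    ∀ (acc : List Int) (s : Int), 0 < s →
    (PySem.List.enumerate rs s).foldl
      (fun new_lst p =>
        if p.1 > 0 then
          if p.2.length ≤ new_lst.length then pvAddRow p.2 new_lst else new_lst
        else new_lst) acc
    = rs.foldl pvStep acc := by
  induction rs with
  | nil => intro acc s _; simp [PySem.List.enumerate_nil]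
  | cons r rs ih =>
    intro acc s hs
    rw [PySem.List.enumerate_cons, List.foldl_cons, List.foldl_cons]
    simp only [if_pos hs]
    rw [ih _ (s + 1) (by omega)]
    rfl

theorem foldl_pvStep (rs : List (List Int)) :
    ∀ (head : List Int),
    rs.foldl pvStep head =
      (List.range head.length).map (fun j =>
        head.getD j 0 +
        ((rs.filter (fun r => r.length ≤ head.length)).filterMap
          (fun r => if j < r.length then some (r.getD j 0) else none)).sum) := by
  induction rs with
  | nil =>
    intro head
    apply List.ext_getElem
    · simp
    · intro i h1 h2
      rw [List.getElem_map]
      simp [List.getElem?_eq_getElem (show i < head.length by simpa using h1)]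
  | cons r rs ih =>
    intro head
    rw [List.foldl_cons, ih (pvStep head r)]
    rw [pvStep_length]
    apply List.map_congr_left
    intro j hj
    rw [List.mem_range] at hj
    by_cases hr : r.length ≤ head.length
    · have h1 : pvStep head r = pvAddRow r head := by unfold pvStep; simp [hr]
      rw [h1, pvAddRow_spec]
      have h2 : (head.mapIdx (fun j x => if j < r.length then x + r.getD j 0 else x)).getD j 0
          = head.getD j 0 + (if j < r.length then r.getD j 0 else 0) := by
        rw [List.getD_eq_getElem _ _ (by simpa using hj),
            List.getD_eq_getElem _ _ hj, List.getElem_mapIdx]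
        split <;> simp
      rw [h2, List.filter_cons_of_pos (by simpa using hr), List.filterMap_cons]
      split <;> simp <;> ring
    · have h1 : pvStep head r = head := by unfold pvStep; simp [hr]
      rw [h1, List.filter_cons_of_neg (by simpa using hr)]

-- ===== VERDICT (by name: the statement is the Claim_ definition above) =====
theorem addAll_spec : Claim_equal_addAll := by
  intro lst _ hpre
  unfold Spec_addAll
  cases lst with
  | nil => exact absurd rfl hpre
  | cons h t =>
    unfold addAll addAll_alt
    rw [PySem.List.enumerate_cons, List.foldl_cons]
    simp only [List.headD_cons, List.tail_cons, gt_iff_lt, lt_irrefl, if_false]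
    simp only [zero_add]
    rw [enum_fold_eq t h 1 (by omega), foldl_pvStep]
    rfl
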